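-- pv_equiv track=rewrite | github.com/MrBrantCode/unitest_baseline | mut_generate/mist_train_cf/cf_93641/solution.py | find_consecutive_intersection
-- ===== SOURCE A (Python) =====
-- def find_consecutive_intersection(list1, list2):
--     intersection = []
--     i = 0
--     j = 0
--
--     while i < len(list1) and j < len(list2):
--         if list1[i] == list2[j]:
--             intersection.append(list1[i])
--             i += 1
--             j += 1
--         else:
--             i += 1
--
--     return intersection
-- ===== SOURCE B (Python) =====
-- def _is_subsequence(small, big):
--     it = iter(big)
--     return all(y in it for y in small)
--
-- def find_consecutive_intersection(list1, list2):
--     # The greedy consecutive match is exactly the longest prefix of list2 that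
--     # is a subsequence of list1.  Being a subsequence is monotone (downward
--     # closed) in the prefix length, so binary-search the largest such length.
--     lo, hi = 0, len(list2)
--     while lo < hi:
--         mid = (lo + hi + 1) // 2
--         if _is_subsequence(list2[:mid], list1):
--             lo = mid
--         else:
--             hi = mid - 1
--     return list2[:lo]
-- ===== Notes on version B (the rewrite author's own statement) =====
-- stated objective: alternative
-- what changed: Instead of A's single greedy two-pointer pass, B characterises the answer as the longest prefix of list2 that is a subsequence of list1 and finds its length by binary search over prefix lengths with a standalone subsequence predicate, then returns that slice of list2.
import Mathlib
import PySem

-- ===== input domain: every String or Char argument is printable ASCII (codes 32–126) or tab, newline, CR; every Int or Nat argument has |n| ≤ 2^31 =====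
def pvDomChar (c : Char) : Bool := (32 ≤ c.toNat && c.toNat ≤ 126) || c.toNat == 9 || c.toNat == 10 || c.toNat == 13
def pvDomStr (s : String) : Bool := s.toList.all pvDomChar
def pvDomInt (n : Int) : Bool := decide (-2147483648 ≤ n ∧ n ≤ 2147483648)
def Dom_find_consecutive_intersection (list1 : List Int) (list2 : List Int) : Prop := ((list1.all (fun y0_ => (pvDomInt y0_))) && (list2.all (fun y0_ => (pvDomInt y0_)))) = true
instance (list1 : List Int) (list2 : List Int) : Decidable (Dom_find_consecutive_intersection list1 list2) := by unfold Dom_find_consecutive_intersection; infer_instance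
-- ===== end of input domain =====

-- B replaces A's greedy two-pointer pass by binary search over prefix lengths of list2 with a standalone subsequence test (an alternative algorithm of different structure, not claimed faster).


-- ===== PORT A =====
-- A's while loop with indices i, j and accumulator `intersection`
def aLoop (list1 list2 : List Int) (i j : Nat) (intersection : List Int) : List Int :=
  if h : i < list1.length ∧ j < list2.length then
    if list1[i]'h.1 == list2[j]'h.2 then
      aLoop list1 list2 (i+1) (j+1) (intersection ++ [list1[i]'h.1])
    else
      aLoop list1 list2 (i+1) j intersection
  else intersection
termination_by list1.length - i
decreasing_by all_goals omega

def find_consecutive_intersection (list1 : List Int) (list2 : List Int) : List Int :=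
  aLoop list1 list2 0 0 []

-- ===== PORT B =====
-- `y in it` for an iterator `it` over `big`: consume big until y is found; none = exhausted
def dropTo (y : Int) : List Int → Option (List Int)
  | [] => none
  | x :: xs => if x == y then some xs else dropTo y xs

-- _is_subsequence(small, big): all(y in it for y in small) over it = iter(big)
def isSub : List Int → List Int → Bool
  | [], _ => true
  | y :: ys, big =>
    match dropTo y big with
    | none => false
    | some rest => isSub ys rest

-- the while lo < hi binary-search loop
def bsearch (list1 list2 : List Int) (lo hi : Nat) : Nat :=
  if _h : lo < hi then
    if isSub (list2.take ((lo + hi + 1) / 2)) list1 then bsearch list1 list2 ((lo + hi + 1) / 2) hi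
    else bsearch list1 list2 lo ((lo + hi + 1) / 2 - 1)
  else lo
termination_by hi - lo
decreasing_by all_goals omega

def find_consecutive_intersection_alt (list1 : List Int) (list2 : List Int) : List Int :=
  list2.take (bsearch list1 list2 0 list2.length)

-- ===== PRECONDITION & SPEC =====
def Spec_find_consecutive_intersection (list1 : List Int) (list2 : List Int) (out : List Int) : Prop := out = find_consecutive_intersection_alt list1 list2
instance (list1 : List Int) (list2 : List Int) (out : List Int) : Decidable (Spec_find_consecutive_intersection list1 list2 out) := by unfold Spec_find_consecutive_intersection; infer_instance

-- ===== CLAIM (what is proved, stated in full; the proofs are below) =====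
def Claim_equal_find_consecutive_intersection : Prop := ∀ (list1 : List Int) (list2 : List Int), Dom_find_consecutive_intersection list1 list2 → Spec_find_consecutive_intersection list1 list2 (find_consecutive_intersection list1 list2)

-- ===== LEMMAS AND PROOFS =====
-- length of the greedy match (proof-only helper)
def glen : List Int → List Int → Nat
  | _, [] => 0
  | [], _ :: _ => 0
  | x :: xs, y :: ys => if x = y then glen xs ys + 1 else glen xs (y :: ys)

lemma glen_nil_left (l2 : List Int) : glen [] l2 = 0 := by
  cases l2 <;> simp [glen]

lemma glen_le (l1 : List Int) : ∀ l2 : List Int, glen l1 l2 ≤ l2.length := by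
  induction l1 with
  | nil => intro l2; simp [glen_nil_left]
  | cons x xs ih =>
    intro l2
    cases l2 with
    | nil => simp [glen]
    | cons y ys =>
      by_cases h : x = y
      · simpa [glen, h] using ih ys
      · have := ih (y :: ys); simp [glen, h]; simpa using this

lemma isSub_cons (y : Int) (p : List Int) (x : Int) (xs : List Int) :
    isSub (y :: p) (x :: xs) = if x == y then isSub p xs else isSub (y :: p) xs := by
  by_cases h : x == y <;> simp [isSub, dropTo, h]

lemma isSub_take (l1 : List Int) : ∀ (l2 : List Int) (k : Nat), k ≤ l2.length →
    isSub (l2.take k) l1 = decide (k ≤ glen l1 l2) := by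
  induction l1 with
  | nil =>
    intro l2 k hk
    cases k with
    | zero => simp [isSub]
    | succ k' =>
      cases l2 with
      | nil => simp at hk
      | cons y ys =>
        simp [isSub, dropTo, glen_nil_left]
  | cons x xs ih =>
    intro l2 k hk
    cases k with
    | zero => simp [isSub]
    | succ k' =>
      cases l2 with
      | nil => simp at hk
      | cons y ys =>
        have hk' : k' ≤ ys.length := by simpa using hk
        rw [List.take_succ_cons, isSub_cons]
        by_cases h : x = y
        · have := ih ys k' hk'
          simp [h, glen, this]
        · have hb : (x == y) = false := by simp [h]
          have := ih (y :: ys) (k' + 1) (by simpa using hk)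
          rw [hb]
          simp only [if_false, Bool.false_eq_true]
          rw [← List.take_succ_cons, this]
          simp [glen, h]

lemma aLoop_take (list1 list2 : List Int) (i j : Nat) (acc : List Int) :
    aLoop list1 list2 i j acc =
      acc ++ (list2.drop j).take (glen (list1.drop i) (list2.drop j)) := by
  rw [aLoop]
  split
  · rename_i h
    have h1 : list1.drop i = list1[i]'h.1 :: list1.drop (i+1) :=
      List.drop_eq_getElem_cons h.1
    have h2 : list2.drop j = list2[j]'h.2 :: list2.drop (j+1) :=
      List.drop_eq_getElem_cons h.2
    rw [h1, h2]
    by_cases heq : list1[i]'h.1 = list2[j]'h.2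
    · rw [if_pos (by simpa using heq)]
      rw [aLoop_take]
      have hg : glen (list1[i]'h.1 :: list1.drop (i+1)) (list2[j]'h.2 :: list2.drop (j+1))
          = glen (list1.drop (i+1)) (list2.drop (j+1)) + 1 := by simp [glen, heq]
      rw [hg, List.take_succ_cons, heq]
      simp
    · rw [if_neg (by simpa using heq)]
      rw [aLoop_take, h2]
      simp [glen, heq]
  · rename_i h
    rcases Nat.lt_or_ge i list1.length with h1 | h1
    · have hj : list2.length ≤ j := by omega
      rw [List.drop_eq_nil_of_le hj]
      simp
    · rw [List.drop_eq_nil_of_le h1, glen_nil_left]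
      simp
termination_by list1.length - i
decreasing_by all_goals omega

lemma bsearch_eq (list1 list2 : List Int) (lo hi : Nat)
    (h1 : lo ≤ glen list1 list2) (h2 : glen list1 list2 ≤ hi) (h3 : hi ≤ list2.length) :
    bsearch list1 list2 lo hi = glen list1 list2 := by
  rw [bsearch]
  split
  · rename_i hlt
    have hmid1 : lo < (lo + hi + 1) / 2 := by omega
    have hmid2 : (lo + hi + 1) / 2 ≤ hi := by omega
    rw [isSub_take list1 list2 _ (le_trans hmid2 h3)]
    by_cases hc : (lo + hi + 1) / 2 ≤ glen list1 list2
    · rw [if_pos (by simpa using hc)]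
      exact bsearch_eq list1 list2 _ hi hc h2 h3
    · rw [if_neg (by simpa using hc)]
      exact bsearch_eq list1 list2 lo _ h1 (by omega) (by omega)
  · omega
termination_by hi - lo
decreasing_by all_goals omega

-- ===== VERDICT (by name: the statement is the Claim_ definition above) =====
theorem find_consecutive_intersection_spec : Claim_equal_find_consecutive_intersection := by
  intro list1 list2 _
  unfold Spec_find_consecutive_intersection find_consecutive_intersection find_consecutive_intersection_alt
  rw [bsearch_eq list1 list2 0 list2.length (Nat.zero_le _) (glen_le list1 list2) le_rfl]
  simpa using aLoop_take list1 list2 0 0 []
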